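-- pv_equiv track=rewrite | github.com/Kim-kwan-woo/Woogorithm-2022 | baekjoon/단계별/재귀/2447.py | solution
-- ===== SOURCE A (Python) =====
-- def solution(star):
--     matrix = []
--     for i in range(3 * len(star)):
--         if i // len(star) == 1:
--             matrix.append(star[i%len(star)] + " " * len(star) + star[i%len(star)])
--         else:
--             matrix.append(star[i%len(star)]*3)
--     return matrix
-- ===== SOURCE B (Python) =====
-- def solution(star):
--     n = len(star)
--     top = [s * 3 for s in star]
--     mid = [s + " " * n + s for s in star]
--     return top + mid + top
-- ===== Notes on version B (the rewrite author's own statement) =====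
-- stated objective: simpler
-- what changed: Decomposes the output into three concatenated blocks (top, middle, top) built by direct passes over star, replacing the single range(3*len) loop with //-and-% index arithmetic, and reuses the top block instead of recomputing it.
import Mathlib
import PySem

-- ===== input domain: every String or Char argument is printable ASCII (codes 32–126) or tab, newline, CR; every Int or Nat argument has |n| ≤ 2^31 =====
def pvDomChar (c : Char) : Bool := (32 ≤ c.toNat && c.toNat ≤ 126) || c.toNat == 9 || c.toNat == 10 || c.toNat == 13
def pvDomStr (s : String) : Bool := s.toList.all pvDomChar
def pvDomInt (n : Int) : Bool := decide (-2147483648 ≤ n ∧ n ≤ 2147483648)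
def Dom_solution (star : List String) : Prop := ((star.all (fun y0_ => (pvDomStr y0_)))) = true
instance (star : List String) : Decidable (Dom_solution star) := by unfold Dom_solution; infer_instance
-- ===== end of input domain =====

-- B builds the fractal as three concatenated blocks (top ++ middle ++ top) by direct
-- passes over star, instead of A's single range(3*len) loop with //-and-% index arithmetic.


-- ===== PORT A =====
-- 's * 3' and '" " * len(star)' are ported by hand (string repetition has no PySem
-- primitive): s ++ s ++ s and List.replicate — exact for these non-negative counts.
def solution (star : List String) : List String :=
  (PySem.List.pyRange 0 (3 * (star.length : Int)) 1).foldl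
    (fun matrix i =>
      if PySem.Int.floordiv i star.length == 1 then
        matrix ++ [PySem.List.pyGetD star (PySem.Int.mod i star.length) "" ++
                   String.ofList (List.replicate star.length ' ') ++
                   PySem.List.pyGetD star (PySem.Int.mod i star.length) ""]
      else
        matrix ++ [PySem.List.pyGetD star (PySem.Int.mod i star.length) "" ++
                   PySem.List.pyGetD star (PySem.Int.mod i star.length) "" ++
                   PySem.List.pyGetD star (PySem.Int.mod i star.length) ""])
    []

-- ===== PORT B =====
def solution_alt (star : List String) : List String :=
  let n := star.length
  let top := star.map (fun s => s ++ s ++ s)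
  let mid := star.map (fun s => s ++ String.ofList (List.replicate n ' ') ++ s)
  (top ++ mid) ++ top

-- ===== PRECONDITION & SPEC =====
def Spec_solution (star : List String) (out : List String) : Prop := out = solution_alt star
instance (star : List String) (out : List String) : Decidable (Spec_solution star out) := by unfold Spec_solution; infer_instance

-- ===== CLAIM (what is proved, stated in full; the proofs are below) =====
def Claim_equal_solution : Prop := ∀ (star : List String), Dom_solution star → Spec_solution star (solution star)

-- ===== LEMMAS AND PROOFS =====

theorem pv_fdiv_block (k j n : Int) (hn : 0 < n) (hj : 0 ≤ j) (hjn : j < n) :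
    PySem.Int.floordiv (k * n + j) n = k := by
  unfold PySem.Int.floordiv
  rw [Int.fdiv_eq_ediv, if_pos (Or.inl hn.le), sub_zero]
  rw [add_comm, Int.add_mul_ediv_right _ _ (by omega : n ≠ 0),
      Int.ediv_eq_zero_of_lt hj hjn, zero_add]

theorem pv_fmod_block (k j n : Int) (hn : 0 < n) (hj : 0 ≤ j) (hjn : j < n) :
    PySem.Int.mod (k * n + j) n = j := by
  unfold PySem.Int.mod
  rw [Int.fmod_eq_emod, if_pos (Or.inl hn.le), add_zero]
  rw [add_comm, Int.add_mul_emod_self_right, Int.emod_eq_of_lt hj hjn]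

theorem pv_map_range_getD {α β : Type} (f : α → β) (l : List α) (d : α) :
    (List.range l.length).map (fun j => f (l.getD j d)) = l.map f := by
  induction l with
  | nil => simp
  | cons a t ih =>
    simp [List.range_succ_eq_map, List.map_map]
    exact ih

theorem pv_map_seg {β : Type} (star : List String) (F : Int → String → β) (k : Int)
    (hn : 0 < (star.length : Int)) :
    (PySem.List.pyRange (k * (star.length : Int)) ((k + 1) * (star.length : Int)) 1).map
      (fun i => F (PySem.Int.floordiv i star.length)
                  (PySem.List.pyGetD star (PySem.Int.mod i star.length) "")) =
    star.map (F k) := by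
  rw [PySem.List.pyRange_one]
  have h1 : ((k + 1) * (star.length : Int) - k * star.length).toNat = star.length := by
    have : (k + 1) * (star.length : Int) - k * star.length = star.length := by ring
    omega
  rw [h1, List.map_map]
  rw [← pv_map_range_getD (F k) star ""]
  apply List.map_congr_left
  intro j hj
  rw [List.mem_range] at hj
  simp only [Function.comp]
  rw [pv_fdiv_block k j star.length hn (by omega) (by exact_mod_cast hj),
      pv_fmod_block k j star.length hn (by omega) (by exact_mod_cast hj),
      PySem.List.pyGetD_natCast]

theorem pv_solution_eq (star : List String) : solution star = solution_alt star := by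
  unfold solution solution_alt
  have hpull : ∀ (body : List String → Int → List String),
      (∀ m i, body m i =
        m ++ [if PySem.Int.floordiv i (star.length : Int) == 1 then
                PySem.List.pyGetD star (PySem.Int.mod i star.length) "" ++
                String.ofList (List.replicate star.length ' ') ++
                PySem.List.pyGetD star (PySem.Int.mod i star.length) ""
              else
                PySem.List.pyGetD star (PySem.Int.mod i star.length) "" ++
                PySem.List.pyGetD star (PySem.Int.mod i star.length) "" ++
                PySem.List.pyGetD star (PySem.Int.mod i star.length) ""]) →
      (PySem.List.pyRange 0 (3 * (star.length : Int)) 1).foldl body [] =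
      (PySem.List.pyRange 0 (3 * (star.length : Int)) 1).map
        (fun i => if PySem.Int.floordiv i (star.length : Int) == 1 then
                PySem.List.pyGetD star (PySem.Int.mod i star.length) "" ++
                String.ofList (List.replicate star.length ' ') ++
                PySem.List.pyGetD star (PySem.Int.mod i star.length) ""
              else
                PySem.List.pyGetD star (PySem.Int.mod i star.length) "" ++
                PySem.List.pyGetD star (PySem.Int.mod i star.length) "" ++
                PySem.List.pyGetD star (PySem.Int.mod i star.length) "") := by
    intro body hbody
    have : body = fun m i =>
        m ++ [if PySem.Int.floordiv i (star.length : Int) == 1 then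
                PySem.List.pyGetD star (PySem.Int.mod i star.length) "" ++
                String.ofList (List.replicate star.length ' ') ++
                PySem.List.pyGetD star (PySem.Int.mod i star.length) ""
              else
                PySem.List.pyGetD star (PySem.Int.mod i star.length) "" ++
                PySem.List.pyGetD star (PySem.Int.mod i star.length) "" ++
                PySem.List.pyGetD star (PySem.Int.mod i star.length) ""] := by
      funext m i; exact hbody m i
    rw [this, PySem.List.foldl_append_singleton_eq_map, List.nil_append]
  rw [hpull _ (fun m i => by split <;> rfl)]
  rcases Nat.eq_zero_or_pos star.length with h0 | hpos
  · rw [List.length_eq_zero_iff] at h0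
    subst h0; simp [PySem.List.pyRange_one]
  · have hn : 0 < (star.length : Int) := by exact_mod_cast hpos
    have hsplit1 : PySem.List.pyRange 0 (3 * (star.length : Int)) 1 =
        PySem.List.pyRange 0 star.length 1 ++ PySem.List.pyRange star.length (3 * star.length) 1 :=
      PySem.List.pyRange_one_append 0 star.length (3 * star.length) (by omega) (by omega)
    have hsplit2 : PySem.List.pyRange (star.length : Int) (3 * (star.length : Int)) 1 =
        PySem.List.pyRange star.length (2 * star.length) 1 ++
        PySem.List.pyRange (2 * star.length) (3 * star.length) 1 :=
      PySem.List.pyRange_one_append star.length (2 * star.length) (3 * star.length)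
        (by omega) (by omega)
    rw [hsplit1, hsplit2, List.map_append, List.map_append]
    set F : Int → String → String := fun q s =>
      if q == 1 then s ++ String.ofList (List.replicate star.length ' ') ++ s
      else s ++ s ++ s with hF
    have hbody : (fun i =>
        if PySem.Int.floordiv i (star.length : Int) == 1 then
          PySem.List.pyGetD star (PySem.Int.mod i star.length) "" ++
          String.ofList (List.replicate star.length ' ') ++
          PySem.List.pyGetD star (PySem.Int.mod i star.length) ""
        else
          PySem.List.pyGetD star (PySem.Int.mod i star.length) "" ++
          PySem.List.pyGetD star (PySem.Int.mod i star.length) "" ++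
          PySem.List.pyGetD star (PySem.Int.mod i star.length) "") =
        (fun i => F (PySem.Int.floordiv i star.length)
                    (PySem.List.pyGetD star (PySem.Int.mod i star.length) "")) := by
      funext i; rw [hF]
    have e0 := pv_map_seg star F 0 hn
    have e1 := pv_map_seg star F 1 hn
    have e2 := pv_map_seg star F 2 hn
    rw [zero_mul, zero_add, one_mul] at e0
    rw [one_mul] at e1
    rw [show ((1:Int) + 1) = 2 by norm_num] at e1
    rw [show ((2:Int) + 1) = 3 by norm_num] at e2
    rw [hbody, e0, e1, e2, hF]
    simp only [beq_iff_eq]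
    norm_num

-- ===== VERDICT (by name: the statement is the Claim_ definition above) =====
theorem solution_spec : Claim_equal_solution := by
  intro star _
  exact pv_solution_eq star
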